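-- pv_equiv track=rewrite | github.com/coderoncodes/shortest_distinct_substring | distinctsubstring.py | distictCh
-- ===== SOURCE A (Python) =====
-- size = 123
--
-- def distictCh(str, n):
--     count = [0]*size
--     for i in range(n):
--         count[ord(str[i])] += 1
--     distinct = 0
--     for i in range(size):
--         if (count[i] != 0):
--             distinct += 1
--     return distinct
-- ===== SOURCE B (Python) =====
-- def distictCh(str, n):
--     # count first occurrences: position i contributes iff str[i] does not
--     # already occur in str[:i]; no auxiliary table or set is kept
--     return sum(1 for i in range(n) if str[i] not in str[:i])
-- ===== Notes on version B (the rewrite author's own statement) =====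
-- stated objective: alternative
-- what changed: Replaces the 123-slot frequency table built in one pass plus a post-hoc scan over all 123 slots by first-occurrence counting with no auxiliary storage at all: position i contributes iff str[i] does not occur in the earlier slice str[:i].
import Mathlib
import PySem

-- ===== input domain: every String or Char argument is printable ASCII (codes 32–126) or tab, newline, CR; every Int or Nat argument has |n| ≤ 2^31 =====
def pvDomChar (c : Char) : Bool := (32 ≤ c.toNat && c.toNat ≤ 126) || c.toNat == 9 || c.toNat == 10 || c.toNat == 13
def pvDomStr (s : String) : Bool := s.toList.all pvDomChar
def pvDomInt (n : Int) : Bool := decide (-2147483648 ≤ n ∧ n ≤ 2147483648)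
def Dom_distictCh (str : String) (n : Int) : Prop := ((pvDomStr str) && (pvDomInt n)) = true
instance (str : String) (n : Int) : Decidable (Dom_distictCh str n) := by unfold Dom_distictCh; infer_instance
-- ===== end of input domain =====

-- B replaces A's 123-slot frequency table and its post-hoc scan over all 123 slots
-- by first-occurrence counting: position i contributes iff str[i] does not occur in
-- str[:i] (objective: alternative — no auxiliary storage, but quadratic).


-- ===== PORT A =====
-- count = [0]*123 updated by the first loop (helper so the proof can name it)
def pvCountA (str : String) (n : Int) : List Int :=
  (PySem.List.pyRange 0 n 1).foldl
    (fun cnt i =>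
      let o : Int := (((PySem.List.pyGet? str.toList i).getD 'a').toNat : Int)
      PySem.List.pySetD cnt o (PySem.List.pyGetD cnt o 0 + 1))
    (List.replicate 123 (0 : Int))

def distictCh (str : String) (n : Int) : Int :=
  (PySem.List.pyRange 0 123 1).foldl
    (fun distinct i => if PySem.List.pyGetD (pvCountA str n) i 0 ≠ 0 then distinct + 1 else distinct) 0

-- ===== PORT B =====
-- sum(1 for i in range(n) if str[i] not in str[:i]); 'c in s' for a single char c
-- is exactly char membership in the slice, ported as List.contains on toList
def distictCh_alt (str : String) (n : Int) : Int :=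
  (PySem.List.pyRange 0 n 1).foldl
    (fun acc i =>
      if ¬ (PySem.List.slice str.toList none (some i)).contains
          ((PySem.List.pyGet? str.toList i).getD 'a')
      then acc + 1 else acc) 0

-- ===== PRECONDITION & SPEC =====
-- Pre_ excludes exactly the inputs where A raises IndexError: n beyond the string's
-- length (str[i] fails) or a prefix character with code ≥ 123 (count[ord] fails).
def Pre_distictCh (str : String) (n : Int) : Prop :=
  n ≤ (str.toList.length : Int) ∧ (str.toList.take n.toNat).all (fun c => decide (c.toNat < 123)) = true
instance (str : String) (n : Int) : Decidable (Pre_distictCh str n) := by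
  unfold Pre_distictCh; infer_instance
def pvWitness_distictCh : String × Int := ("abca", 3)

def Spec_distictCh (str : String) (n : Int) (out : Int) : Prop := out = distictCh_alt str n
instance (str : String) (n : Int) (out : Int) : Decidable (Spec_distictCh str n out) := by
  unfold Spec_distictCh; infer_instance

-- ===== CLAIM (what is proved, stated in full; the proofs are below) =====
def Claim_equal_distictCh : Prop := ∀ (str : String) (n : Int), Dom_distictCh str n →
  Pre_distictCh str n → Spec_distictCh str n (distictCh str n)
-- ===== LEMMAS AND PROOFS =====

-- A's first loop, expressed over the character list
def pvStepA (cnt : List Int) (c : Char) : List Int :=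
  PySem.List.pySetD cnt ((c.toNat : Int)) (PySem.List.pyGetD cnt ((c.toNat : Int)) 0 + 1)

theorem pvPrefix_eq (xs : List Char) (n : Int) (h : n ≤ (xs.length : Int)) :
    (PySem.List.pyRange 0 n 1).map (fun i => (PySem.List.pyGet? xs i).getD 'a')
      = xs.take n.toNat := by
  rw [PySem.List.pyRange_one, List.map_map]
  apply List.ext_getElem
  · simp; omega
  · intro i h1 h2
    simp at h1
    simp [PySem.List.pyGet?_natCast, List.getElem_take,
      List.getElem?_eq_getElem (show i < xs.length by omega)]

theorem pvGetDA (l : List Char) (cnt : List Int) (hlen : cnt.length = 123)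
    (hl : ∀ c ∈ l, c.toNat < 123) (j : Nat) (_hj : j < 123) :
    PySem.List.pyGetD (l.foldl pvStepA cnt) (j : Int) 0
      = PySem.List.pyGetD cnt (j : Int) 0 + (l.countP (fun c => c.toNat == j) : Int) := by
  induction l generalizing cnt with
  | nil => simp
  | cons c l ih =>
    have hc : c.toNat < 123 := hl c (by simp)
    have hrest : ∀ x ∈ l, x.toNat < 123 := fun x hx => hl x (List.mem_cons_of_mem _ hx)
    have hlen' : (pvStepA cnt c).length = 123 := by
      simp [pvStepA, hlen]
    rw [List.foldl_cons, ih (pvStepA cnt c) hlen' hrest]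
    rw [show pvStepA cnt c = PySem.List.pySetD cnt ((c.toNat : Int))
          (PySem.List.pyGetD cnt ((c.toNat : Int)) 0 + 1) from rfl]
    rw [PySem.List.pyGetD_pySetD_natCast cnt c.toNat j _ _ (by omega)]
    by_cases h : j = c.toNat
    · simp [h]; ring
    · have : ¬ (c.toNat == j) = true := by simp; omega
      simp [h, this]

-- number of codes below 123 that occur in l = number of distinct characters of l
theorem pvCountCard (l : List Char) (hl : ∀ c ∈ l, c.toNat < 123) :
    (List.range 123).countP (fun k => l.countP (fun c => c.toNat == k) != 0)
      = (PySem.Set.ofList l).length := by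
  have hinj : Function.Injective Char.toNat := by
    intro a b h; exact Char.ext (UInt32.toNat_inj.mp h)
  have hperm : ((List.range 123).filter (fun k => l.countP (fun c => c.toNat == k) != 0)).Perm
      ((PySem.Set.ofList l).map Char.toNat) := by
    rw [List.perm_ext_iff_of_nodup ((List.nodup_range).filter _)
      ((PySem.Set.nodup_ofList l).map hinj)]
    intro j
    simp only [List.mem_filter, List.mem_range, List.mem_map, PySem.Set.mem_ofList]
    constructor
    · rintro ⟨hj, hcnt⟩
      have : l.countP (fun c => c.toNat == j) ≠ 0 := by simpa using hcnt
      rw [Ne, List.countP_eq_zero] at this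
      push Not at this
      obtain ⟨c, hc, hcj⟩ := this
      exact ⟨c, hc, by simpa using hcj⟩
    · rintro ⟨c, hc, rfl⟩
      refine ⟨hl c hc, ?_⟩
      simp only [bne_iff_ne, Ne, List.countP_eq_zero]
      push Not
      exact ⟨c, hc, by simp⟩
  calc (List.range 123).countP (fun k => l.countP (fun c => c.toNat == k) != 0)
      = ((List.range 123).filter (fun k => l.countP (fun c => c.toNat == k) != 0)).length :=
        List.countP_eq_length_filter
    _ = ((PySem.Set.ofList l).map Char.toNat).length := hperm.length_eq
    _ = (PySem.Set.ofList l).length := List.length_map ..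

-- B counts first occurrences: over any list, the number of positions k < m whose
-- element does not occur earlier equals the number of distinct elements of take m
theorem pvFirstOcc (L : List Char) (m : Nat) (hm : m ≤ L.length) :
    (List.range m).countP (fun k => !((L.take k).contains (L.getD k 'a')))
      = (PySem.Set.ofList (L.take m)).length := by
  induction m with
  | zero => simp [PySem.Set.ofList]
  | succ m ih =>
    have hm' : m ≤ L.length := by omega
    have hmlt : m < L.length := by omega
    rw [List.range_succ, List.countP_append, ih hm']
    have htake : L.take (m + 1) = L.take m ++ [L[m]] := by
      rw [List.take_add_one, List.getElem?_eq_getElem hmlt]; rfl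
    rw [htake]
    have hof : PySem.Set.ofList (L.take m ++ [L[m]])
        = PySem.Set.add (PySem.Set.ofList (L.take m)) L[m] := by
      rw [PySem.Set.ofList_eq_foldl, List.foldl_append, ← PySem.Set.ofList_eq_foldl]
      rfl
    rw [hof]
    have hgetD : L.getD m 'a' = L[m] := List.getD_eq_getElem L 'a' hmlt
    by_cases hmem : L[m] ∈ L.take m
    · simp [PySem.Set.add, PySem.Set.contains, List.getElem?_eq_getElem hmlt, hmem]
    · simp [PySem.Set.add, PySem.Set.contains, List.getElem?_eq_getElem hmlt, hmem]

-- ===== VERDICT (by name: the statement is the Claim_ definition above) =====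
theorem distictCh_spec : Claim_equal_distictCh := by
  unfold Claim_equal_distictCh
  intro str n _ hpre
  obtain ⟨hn, hcodeB⟩ := hpre
  have hcode : ∀ c ∈ str.toList.take n.toNat, c.toNat < 123 := by
    simpa [List.all_eq_true] using hcodeB
  unfold Spec_distictCh distictCh distictCh_alt
  set L := str.toList with hL
  set m := n.toNat with hmdef
  have hmle : m ≤ L.length := by omega
  -- B side: foldl over range(n) = countP of the first-occurrence predicate
  have hB : (PySem.List.pyRange 0 n 1).foldl
      (fun acc i => if ¬ (PySem.List.slice L none (some i)).contains
          ((PySem.List.pyGet? L i).getD 'a') then acc + 1 else acc) 0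
      = ((List.range m).countP (fun k => !((L.take k).contains (L.getD k 'a'))) : Int) := by
    rw [PySem.List.pyRange_one, List.foldl_map]
    have hco := PySem.List.foldl_count_if (fun k : Nat =>
        decide (¬ (PySem.List.slice L none (some ((0 : Int) + (k : Int)))).contains
          ((PySem.List.pyGet? L ((0 : Int) + (k : Int))).getD 'a')))
      (List.range ((n : Int) - 0).toNat) 0
    simp only [decide_eq_true_eq, zero_add] at hco ⊢
    rw [hco, show ((n : Int) - 0).toNat = m by omega]
    congr 1
    refine List.countP_congr ?_
    intro k hk
    simp only [List.mem_range] at hk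
    have hkL : k < L.length := by omega
    rw [PySem.List.slice_to_natCast, PySem.List.pyGet?_natCast,
      List.getElem?_eq_getElem hkL]
    simp [List.getD_eq_getElem?_getD, List.getElem?_eq_getElem hkL]
  rw [hB, pvFirstOcc L m hmle]
  -- A side: the 123-slot scan counts the distinct characters of take m
  have hmap : (PySem.List.pyRange 0 n 1).map
      (fun i => (PySem.List.pyGet? L i).getD 'a') = L.take m :=
    pvPrefix_eq L n hn
  have hfoldA : pvCountA str n = (L.take m).foldl pvStepA (List.replicate 123 (0 : Int)) := by
    unfold pvCountA
    rw [← hmap, List.foldl_map]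
    rfl
  rw [hfoldA]
  set l := L.take m with hldef
  set count := l.foldl pvStepA (List.replicate 123 (0 : Int)) with hcount
  rw [PySem.List.pyRange_one, List.foldl_map]
  have hco := PySem.List.foldl_count_if (fun k : Nat =>
      decide (PySem.List.pyGetD count ((0 : Int) + (k : Int)) 0 ≠ 0))
    (List.range ((123 : Int) - 0).toNat) 0
  simp only [decide_eq_true_eq, zero_add] at hco ⊢
  rw [hco, show ((123 : Int) - 0).toNat = 123 from rfl]
  have hc2 : (List.range 123).countP (fun k => decide (PySem.List.pyGetD count ((k : Nat) : Int) 0 ≠ 0))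
      = (List.range 123).countP (fun k => l.countP (fun c => c.toNat == k) != 0) := by
    refine List.countP_congr ?_
    intro k hk
    simp only [List.mem_range] at hk
    simp only [decide_eq_true_eq, bne_iff_ne, ne_eq]
    rw [hcount, pvGetDA l (List.replicate 123 (0 : Int)) (by simp) hcode k hk]
    rw [PySem.List.pyGetD_natCast]
    have hrep : (List.replicate 123 (0 : Int)).getD k 0 = 0 := by
      rw [List.getD_eq_getElem?_getD, List.getElem?_replicate]
      split_ifs <;> rfl
    rw [hrep, zero_add, Nat.cast_eq_zero]
  rw [hc2, pvCountCard l hcode]
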